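-- pv_equiv track=rewrite | github.com/Rushijaviya/LeetCode-Contest | Biweekly Contest/Biweekly Contest 93/4_Minimum Total Cost to Make Arrays Unequal.py | minimumTotalCost
-- ===== SOURCE A (Python) =====
-- from collections import defaultdict
--
-- def minimumTotalCost(nums1, nums2):
--     d=defaultdict(int)
--     n=len(nums1)
--     swap=0
--     max_freq=0
--     max_ele=0
--     ans=0
--     for i in range(n):
--         if nums1[i]==nums2[i]:
--             d[nums1[i]]+=1
--             if max_freq<d[nums1[i]]:
--                 max_freq=d[nums1[i]]
--                 max_ele=nums1[i]
--             swap+=1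
--             ans+=i
--     for i in range(n):
--         if max_freq>(swap//2) and nums1[i]!=nums2[i] and nums1[i]!=max_ele and nums2[i]!=max_ele:
--             swap+=1
--             ans+=i
--     if max_freq>(swap//2):
--         return -1
--     return ans
-- ===== SOURCE B (Python) =====
-- def minimumTotalCost(nums1, nums2):
--     pairs = list(zip(nums1, nums2))
--     coll = [i for i, (x, y) in enumerate(pairs) if x == y]
--     vals = [x for x, y in pairs if x == y]
--     ans = sum(coll)
--     swap = len(coll)
--     # Boyer-Moore majority vote over the colliding values
--     cand, votes = 0, 0
--     for v in vals:
--         if votes == 0: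
--             cand, votes = v, 1
--         elif v == cand:
--             votes += 1
--         else:
--             votes -= 1
--     c = vals.count(cand)
--     if 2 * c <= swap:
--         return ans
--     extras = [i for i, (x, y) in enumerate(pairs)
--               if x != y and x != cand and y != cand]
--     need = 2 * c - swap
--     if len(extras) < need:
--         return -1
--     return ans + sum(extras[:need])
-- ===== Notes on version B (the rewrite author's own statement) =====
-- stated objective: alternative
-- what changed: B finds the dominant colliding value by a Boyer-Moore majority vote plus one verification count (instead of A's counter dict with inline running-max tracking), and replaces A's condition-retesting second loop by building the candidate index list once and summing its first `need = 2*c - swap` entries via a slice, returning -1 in closed form when the list is too short.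
import Mathlib
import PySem

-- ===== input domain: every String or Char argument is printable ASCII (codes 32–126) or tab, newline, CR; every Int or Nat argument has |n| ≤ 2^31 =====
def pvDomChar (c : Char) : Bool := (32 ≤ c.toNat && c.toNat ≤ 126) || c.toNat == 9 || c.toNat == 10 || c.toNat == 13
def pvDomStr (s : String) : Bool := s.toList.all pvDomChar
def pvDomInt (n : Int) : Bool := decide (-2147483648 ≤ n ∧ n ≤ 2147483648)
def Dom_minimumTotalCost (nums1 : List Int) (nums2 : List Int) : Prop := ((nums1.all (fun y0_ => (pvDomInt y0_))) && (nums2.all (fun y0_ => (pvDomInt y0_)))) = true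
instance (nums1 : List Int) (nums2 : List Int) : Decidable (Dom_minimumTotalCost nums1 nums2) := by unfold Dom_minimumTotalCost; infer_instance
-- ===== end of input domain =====

-- B replaces A's counter dict with inline running-max tracking by a Boyer-Moore majority
-- vote plus one verification count, and A's condition-retesting second loop by a candidate
-- list built once whose first `need` entries are summed via a slice (objective: alternative).

-- ===== PORT A =====
def minimumTotalCost (nums1 : List Int) (nums2 : List Int) : Int :=
  let n := nums1.length
  let st1 := (List.range n).foldl
    (fun (st : PySem.Dict Int Int × Int × Int × Int × Int) (i : Nat) =>
      match st with
      | (d, swap, max_freq, max_ele, ans) =>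
        let x := PySem.List.pyGetD nums1 (i : Int) 0
        let y := PySem.List.pyGetD nums2 (i : Int) 0
        if x == y then
          let d' := d.modify x 0 (· + 1)
          let c := d'.getD x 0
          if max_freq < c then (d', swap + 1, c, x, ans + (i : Int))
          else (d', swap + 1, max_freq, max_ele, ans + (i : Int))
        else (d, swap, max_freq, max_ele, ans))
    (PySem.Dict.empty, 0, 0, 0, 0)
  match st1 with
  | (_, swap1, max_freq, max_ele, ans1) =>
    let st2 := (List.range n).foldl
      (fun (st : Int × Int) (i : Nat) =>
        let x := PySem.List.pyGetD nums1 (i : Int) 0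
        let y := PySem.List.pyGetD nums2 (i : Int) 0
        if PySem.Int.floordiv st.1 2 < max_freq ∧ x ≠ y ∧ x ≠ max_ele ∧ y ≠ max_ele then
          (st.1 + 1, st.2 + (i : Int))
        else st)
      (swap1, ans1)
    if PySem.Int.floordiv st2.1 2 < max_freq then -1 else st2.2

-- ===== PORT B =====
-- Source B's Boyer-Moore voting step (the body of `for v in vals: ...`)
def pvVote (st : Int × Int) (v : Int) : Int × Int :=
  if st.2 == 0 then (v, 1)
  else if v == st.1 then (st.1, st.2 + 1)
  else (st.1, st.2 - 1)

-- Source B's candidate-index predicate `x != y and x != cand and y != cand`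
def pvPred (e : Int) (t : Int × Int × Int) : Bool :=
  t.2.1 != t.2.2 && t.2.1 != e && t.2.2 != e

def minimumTotalCost_alt (nums1 : List Int) (nums2 : List Int) : Int :=
  let pairs := nums1.zip nums2
  let coll := ((PySem.List.enumerate pairs 0).filter (fun p => p.2.1 == p.2.2)).map (fun p => p.1)
  let vals := (pairs.filter (fun p => p.1 == p.2)).map (fun p => p.1)
  let ans := coll.sum
  let swap := (coll.length : Int)
  let cand := (vals.foldl pvVote (0, 0)).1
  let c : Int := (vals.count cand : Int)
  if 2 * c ≤ swap then ans
  else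
    let extras := ((PySem.List.enumerate pairs 0).filter (pvPred cand)).map (fun p => p.1)
    let need := 2 * c - swap
    if (extras.length : Int) < need then -1
    else ans + (PySem.List.slice extras none (some need)).sum

-- ===== PRECONDITION & SPEC =====
-- Pre_ excludes exactly the inputs on which A raises IndexError (nums2 shorter than nums1);
-- A returns normally on every input satisfying Pre_.
def Pre_minimumTotalCost (nums1 : List Int) (nums2 : List Int) : Prop :=
  nums1.length ≤ nums2.length
instance (nums1 : List Int) (nums2 : List Int) : Decidable (Pre_minimumTotalCost nums1 nums2) := by
  unfold Pre_minimumTotalCost; infer_instance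

def pvWitness_minimumTotalCost : List Int × List Int := ([1, 1, 2, 3], [1, 1, 3, 2])

def Spec_minimumTotalCost (nums1 : List Int) (nums2 : List Int) (out : Int) : Prop := out = minimumTotalCost_alt nums1 nums2
instance (nums1 : List Int) (nums2 : List Int) (out : Int) : Decidable (Spec_minimumTotalCost nums1 nums2 out) := by unfold Spec_minimumTotalCost; infer_instance

-- ===== CLAIM (what is proved, stated in full; the proofs are below) =====
def Claim_equal_minimumTotalCost : Prop := ∀ (nums1 : List Int) (nums2 : List Int), Dom_minimumTotalCost nums1 nums2 → Pre_minimumTotalCost nums1 nums2 → Spec_minimumTotalCost nums1 nums2 (minimumTotalCost nums1 nums2)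

-- ===== LEMMAS AND PROOFS =====

-- A's first loop, as a step function over (index, nums1[i], nums2[i]) triples
def pvStep1 (st : PySem.Dict Int Int × Int × Int × Int × Int) (t : Int × Int × Int) :
    PySem.Dict Int Int × Int × Int × Int × Int :=
  match st with
  | (d, swap, max_freq, max_ele, ans) =>
    let x := t.2.1
    let y := t.2.2
    if x == y then
      let d' := d.modify x 0 (· + 1)
      let c := d'.getD x 0
      if max_freq < c then (d', swap + 1, c, x, ans + t.1)
      else (d', swap + 1, max_freq, max_ele, ans + t.1)
    else (d, swap, max_freq, max_ele, ans)

-- A's second loop, as a step function over the same triples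
def pvStep2 (max_freq max_ele : Int) (st : Int × Int) (t : Int × Int × Int) : Int × Int :=
  if PySem.Int.floordiv st.1 2 < max_freq ∧ t.2.1 ≠ t.2.2 ∧ t.2.1 ≠ max_ele ∧ t.2.2 ≠ max_ele then
    (st.1 + 1, st.2 + t.1)
  else st

def pvColls (q : List (Int × Int × Int)) : List (Int × Int × Int) :=
  q.filter (fun t => t.2.1 == t.2.2)

def pvXs (q : List (Int × Int × Int)) : List Int :=
  (pvColls q).map (fun t => t.2.1)

lemma pvEnumZip (l1 l2 : List Int) (h : l1.length ≤ l2.length) :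
    PySem.List.enumerate (l1.zip l2) 0
      = (List.range l1.length).map (fun (k : Nat) => ((k : Int), (l1.getD k 0, l2.getD k 0))) := by
  apply List.ext_getElem
  · simp [PySem.List.length_enumerate, Nat.min_eq_left h]
  · intro i h1 h2
    have hi : i < l1.length := by
      simpa [PySem.List.length_enumerate, List.length_zip, Nat.min_eq_left h] using h1
    simp [PySem.List.enumerate_eq_zipIdx_map, List.getElem_zipIdx, List.getElem_zip,
      List.getD_eq_getElem?_getD, hi, hi.trans_le h]

lemma pvBridge (l1 l2 : List Int) (h : l1.length ≤ l2.length) {σ : Type}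
    (F : σ → Int × Int × Int → σ) (init : σ) :
    (List.range l1.length).foldl
      (fun s (i : Nat) => F s ((i : Int), PySem.List.pyGetD l1 (i : Int) 0, PySem.List.pyGetD l2 (i : Int) 0)) init
      = (PySem.List.enumerate (l1.zip l2) 0).foldl F init := by
  rw [pvEnumZip l1 l2 h, List.foldl_map]
  simp only [PySem.List.pyGetD_natCast, List.getD_eq_getElem?_getD]

lemma pvTwoCount (l : List Int) (a b : Int) (hab : a ≠ b) :
    l.count a + l.count b ≤ l.length := by
  induction l with
  | nil => simp
  | cons x t ih =>
    simp only [List.count_cons, List.length_cons]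
    by_cases hx : x = a <;> by_cases hy : x = b <;> simp_all <;> omega

-- Boyer-Moore invariant: votes stay nonnegative, and every value's count is bounded
-- by (length + votes)/2 for the candidate and (length - votes)/2 for everything else.
lemma pvVoteInv (l : List Int) :
    0 ≤ (l.foldl pvVote (0, 0)).2
  ∧ ∀ v : Int, 2 * (l.count v : Int) ≤ (l.length : Int) +
      (if v = (l.foldl pvVote (0, 0)).1 then (l.foldl pvVote (0, 0)).2
       else -(l.foldl pvVote (0, 0)).2) := by
  induction l using List.reverseRecOn with
  | nil => simp
  | append_singleton q t ih =>
    obtain ⟨ih0, ihv⟩ := ih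
    rcases hst : q.foldl pvVote (0, 0) with ⟨cand, votes⟩
    rw [hst] at ih0 ihv
    dsimp only at ih0 ihv
    simp only [List.foldl_append, List.foldl_cons, List.foldl_nil, hst]
    have hcount : ∀ v : Int, ((q ++ [t]).count v : Int)
        = (q.count v : Int) + (if t = v then 1 else 0) := by
      intro v
      by_cases h : t = v <;> simp [List.count_append, h]
    have hlen : ((q ++ [t]).length : Int) = (q.length : Int) + 1 := by
      simp [List.length_append]
    by_cases h0 : votes = 0
    · have hstep : pvVote (cand, votes) t = (t, 1) := by
        simp [pvVote, h0]
      rw [hstep]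
      refine ⟨by norm_num, ?_⟩
      intro v
      have hv := ihv v
      rw [hcount v, hlen]
      dsimp only
      split_ifs at hv ⊢ <;> omega
    · by_cases hc : t = cand
      · have hstep : pvVote (cand, votes) t = (cand, votes + 1) := by
          simp [pvVote, h0, hc]
        rw [hstep]
        refine ⟨by omega, ?_⟩
        intro v
        have hv := ihv v
        rw [hcount v, hlen]
        dsimp only
        split_ifs at hv ⊢ <;> omega
      · have hstep : pvVote (cand, votes) t = (cand, votes - 1) := by
          simp [pvVote, h0, hc]
        rw [hstep]
        refine ⟨by omega, ?_⟩
        intro v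
        have hv := ihv v
        rw [hcount v, hlen]
        dsimp only
        split_ifs at hv ⊢ <;> omega

lemma pvVoteMajority (l : List Int) (m : Int) (h : (l.length : Int) < 2 * (l.count m : Int)) :
    (l.foldl pvVote (0, 0)).1 = m := by
  obtain ⟨h0, hv⟩ := pvVoteInv l
  have hm := hv m
  by_contra hne
  rw [if_neg (fun he => hne he.symm)] at hm
  omega

theorem pvLoop2Id (max_freq max_ele : Int) (q : List (Int × Int × Int)) (st : Int × Int)
    (h : ¬ PySem.Int.floordiv st.1 2 < max_freq) :
    q.foldl (pvStep2 max_freq max_ele) st = st := by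
  induction q with
  | nil => rfl
  | cons t ts ih =>
    simp only [List.foldl_cons]
    rw [show pvStep2 max_freq max_ele st t = st from by
      unfold pvStep2; rw [if_neg]; rintro ⟨h1, -⟩; exact h h1]
    exact ih

-- A's second loop + final check equals: -1 if fewer than `2*c - swap` candidate
-- indices exist, else ans + sum of the first `2*c - swap` of them.
theorem pvLoop2Slice (c e : Int) (q : List (Int × Int × Int)) :
    ∀ swap ans : Int, swap < 2 * c →
    (if PySem.Int.floordiv (q.foldl (pvStep2 c e) (swap, ans)).1 2 < c then (-1 : Int)
     else (q.foldl (pvStep2 c e) (swap, ans)).2)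
      = (if (((q.filter (pvPred e)).map (fun t => t.1)).length : Int) < 2 * c - swap
          then (-1 : Int)
          else ans + (((q.filter (pvPred e)).map (fun t => t.1)).take (2 * c - swap).toNat).sum) := by
  have hdiv : ∀ s : Int, PySem.Int.floordiv s 2 < c ↔ s < 2 * c := by
    intro s
    rw [PySem.Int.floordiv_lt_iff_lt_mul (by omega : (0:Int) < 2)]
    omega
  induction q with
  | nil =>
    intro swap ans hlt
    simp only [List.foldl_nil, List.filter_nil, List.map_nil, List.length_nil]
    rw [if_pos ((hdiv swap).mpr hlt), if_pos (by exact_mod_cast by omega : ((0:Nat):Int) < 2 * c - swap)]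
  | cons t ts ih =>
    intro swap ans hlt
    obtain ⟨i, x, y⟩ := t
    simp only [List.foldl_cons, List.filter_cons]
    by_cases hp : pvPred e (i, x, y) = true
    · have hprop : x ≠ y ∧ x ≠ e ∧ y ≠ e := by
        simpa [pvPred, and_assoc] using hp
      rw [if_pos hp]
      rw [show pvStep2 c e (swap, ans) (i, x, y) = (swap + 1, ans + i) from by
        unfold pvStep2
        rw [if_pos ⟨(hdiv swap).mpr hlt, hprop.1, hprop.2.1, hprop.2.2⟩]]
      simp only [List.map_cons, List.length_cons]
      by_cases hz : swap + 1 = 2 * c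
      · rw [pvLoop2Id c e ts (swap + 1, ans + i) (by rw [hdiv]; omega)]
        rw [if_neg (by rw [hdiv]; omega)]
        have hone : 2 * c - swap = 1 := by omega
        rw [hone]
        rw [if_neg (by push_cast; omega)]
        simp
      · have hlt' : swap + 1 < 2 * c := by omega
        rw [ih (swap + 1) (ans + i) hlt']
        have htn : (2 * c - swap).toNat = (2 * c - (swap + 1)).toNat + 1 := by omega
        rw [htn, List.take_succ_cons, List.sum_cons]
        have hcond : (((((ts.filter (pvPred e)).map (fun t => t.1)).length : Nat) : Int) < 2 * c - (swap + 1))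
            ↔ ((((((ts.filter (pvPred e)).map (fun t => t.1)).length : Nat) + 1 : Nat) : Int) < 2 * c - swap) := by
          push_cast; omega
        by_cases hsh : ((((ts.filter (pvPred e)).map (fun t => t.1)).length : Nat) : Int) < 2 * c - (swap + 1)
        · rw [if_pos hsh, if_pos (hcond.mp hsh)]
        · rw [if_neg hsh, if_neg (fun hh => hsh (hcond.mpr hh))]
          ring
    · have hnp : ¬ (x ≠ y ∧ x ≠ e ∧ y ≠ e) := by
        intro hc
        exact hp (by simp [pvPred, hc.1, hc.2.1, hc.2.2])
      rw [if_neg hp]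
      rw [show pvStep2 c e (swap, ans) (i, x, y) = (swap, ans) from by
        unfold pvStep2; rw [if_neg]; rintro ⟨-, h2⟩; exact hnp h2]
      exact ih swap ans hlt

theorem pvL1 (q : List (Int × Int × Int)) :
    (q.foldl pvStep1 (PySem.Dict.empty, 0, 0, 0, 0)).1 = PySem.Dict.counter (pvXs q)
  ∧ (q.foldl pvStep1 (PySem.Dict.empty, 0, 0, 0, 0)).2.1 = ((pvXs q).length : Int)
  ∧ (q.foldl pvStep1 (PySem.Dict.empty, 0, 0, 0, 0)).2.2.2.2
      = ((pvColls q).map (fun t => t.1)).sum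
  ∧ (q.foldl pvStep1 (PySem.Dict.empty, 0, 0, 0, 0)).2.2.1
      = (((pvXs q).count ((q.foldl pvStep1 (PySem.Dict.empty, 0, 0, 0, 0)).2.2.2.1) : Int))
  ∧ ∀ k : Int, (((pvXs q).count k : Int)) ≤ (q.foldl pvStep1 (PySem.Dict.empty, 0, 0, 0, 0)).2.2.1 := by
  induction q using List.reverseRecOn with
  | nil =>
    refine ⟨rfl, by simp [pvXs, pvColls], by simp [pvColls], by simp [pvXs, pvColls], ?_⟩
    intro k; simp [pvXs, pvColls]
  | append_singleton q t ih =>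
    obtain ⟨ihd, ihs, iha, ihm, ihe⟩ := ih
    rcases hst : q.foldl pvStep1 (PySem.Dict.empty, 0, 0, 0, 0) with ⟨d, s, mf, me, a⟩
    rw [hst] at ihd ihs iha ihm ihe
    dsimp only at ihd ihs iha ihm ihe
    simp only [List.foldl_append, List.foldl_cons, List.foldl_nil, hst]
    by_cases hxy : t.2.1 = t.2.2
    · have hcolls : pvColls (q ++ [t]) = pvColls q ++ [t] := by
        simp [pvColls, List.filter_append, hxy]
      have hxs : pvXs (q ++ [t]) = pvXs q ++ [t.2.1] := by
        simp [pvXs, hcolls]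
      have hdmod : d.modify t.2.1 0 (· + 1) = PySem.Dict.counter (pvXs (q ++ [t])) := by
        rw [ihd, hxs, PySem.Dict.counter_append_singleton]
      have hcval : (d.modify t.2.1 0 (· + 1)).getD t.2.1 0 = ((pvXs q).count t.2.1 : Int) + 1 := by
        rw [ihd, PySem.Dict.getD_modify_self, PySem.Dict.getD_counter]
      have hcount : ∀ k : Int, ((pvXs (q ++ [t])).count k : Int)
          = ((pvXs q).count k : Int) + (if k = t.2.1 then 1 else 0) := by
        intro k
        rw [hxs]
        by_cases hk : k = t.2.1
        · simp [List.count_append, hk]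
        · simp [List.count_append, List.count_singleton, hk]
          omega
      have hlen : ((pvXs (q ++ [t])).length : Int) = ((pvXs q).length : Int) + 1 := by
        rw [hxs]; simp [List.length_append]
      have hsum : ((pvColls (q ++ [t])).map (fun t => t.1)).sum
          = ((pvColls q).map (fun t => t.1)).sum + t.1 := by
        rw [hcolls]; simp
      by_cases hlt : mf < ((pvXs q).count t.2.1 : Int) + 1
      · have hstep : pvStep1 (d, s, mf, me, a) t
            = (d.modify t.2.1 0 (· + 1), s + 1, ((pvXs q).count t.2.1 : Int) + 1, t.2.1, a + t.1) := by
          dsimp only [pvStep1]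
          rw [if_pos (beq_iff_eq.mpr hxy), hcval, if_pos hlt]
        rw [hstep]
        refine ⟨hdmod, by dsimp only; rw [ihs, hlen], by dsimp only; rw [iha, hsum], ?_, ?_⟩
        · dsimp only; rw [hcount t.2.1, if_pos rfl]
        · intro k
          dsimp only
          rw [hcount k]
          by_cases hk : k = t.2.1
          · simp [hk]
          · have := ihe k
            simp only [hk, if_false]
            omega
      · have hmex : me ≠ t.2.1 := by
          intro hme
          rw [hme] at ihm
          omega
        have hstep : pvStep1 (d, s, mf, me, a) t
            = (d.modify t.2.1 0 (· + 1), s + 1, mf, me, a + t.1) := by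
          dsimp only [pvStep1]
          rw [if_pos (beq_iff_eq.mpr hxy), hcval, if_neg hlt]
        rw [hstep]
        refine ⟨hdmod, by dsimp only; rw [ihs, hlen], by dsimp only; rw [iha, hsum], ?_, ?_⟩
        · dsimp only
          rw [hcount me, if_neg hmex, ihm]; omega
        · intro k
          dsimp only
          rw [hcount k]
          by_cases hk : k = t.2.1
          · have := ihe k
            rw [hk] at this ⊢
            rw [if_pos rfl]; omega
          · have := ihe k
            simp only [hk, if_false]
            omega
    · have hcolls : pvColls (q ++ [t]) = pvColls q := by
        simp [pvColls, List.filter_append, hxy]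
      have hxs : pvXs (q ++ [t]) = pvXs q := by rw [pvXs, pvXs, hcolls]
      have hstep : pvStep1 (d, s, mf, me, a) t = (d, s, mf, me, a) := by
        dsimp only [pvStep1]
        rw [if_neg (by simpa using hxy)]
      rw [hstep]
      exact ⟨by rw [ihd, hxs], by rw [hxs]; exact ihs, by rw [hcolls]; exact iha,
        by rw [hxs]; exact ihm, fun k => by rw [hxs]; exact ihe k⟩

lemma pvEnumFilterMap (l : List (Int × Int)) (p : (Int × Int) → Bool) : ∀ s : Int,
    ((PySem.List.enumerate l s).filter (fun q => p q.2)).map (fun q => q.2) = l.filter p := by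
  induction l with
  | nil => intro s; simp [PySem.List.enumerate_nil]
  | cons x t ih =>
    intro s
    simp only [PySem.List.enumerate_cons, List.filter_cons]
    by_cases hp : p x
    · simp [hp, ih]
    · simp [hp, ih]

theorem minimumTotalCost_spec' (l1 l2 : List Int) (hpre : l1.length ≤ l2.length) :
    minimumTotalCost l1 l2 = minimumTotalCost_alt l1 l2 := by
  have h0 : minimumTotalCost l1 l2 =
      (fun st1 : PySem.Dict Int Int × Int × Int × Int × Int =>
        match st1 with
        | (_, swap1, mf, me, ans1) =>
          (fun st2 : Int × Int =>
            if PySem.Int.floordiv st2.1 2 < mf then (-1 : Int) else st2.2)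
            ((List.range l1.length).foldl
              (fun s (i : Nat) => pvStep2 mf me s
                ((i : Int), PySem.List.pyGetD l1 (i : Int) 0, PySem.List.pyGetD l2 (i : Int) 0))
              (swap1, ans1)))
        ((List.range l1.length).foldl
          (fun s (i : Nat) => pvStep1 s
            ((i : Int), PySem.List.pyGetD l1 (i : Int) 0, PySem.List.pyGetD l2 (i : Int) 0))
          (PySem.Dict.empty, 0, 0, 0, 0)) := rfl
  rw [pvBridge l1 l2 hpre pvStep1] at h0
  rcases hst1 : (PySem.List.enumerate (l1.zip l2) 0).foldl pvStep1 (PySem.Dict.empty, 0, 0, 0, 0)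
    with ⟨d, s, mf, me, a⟩
  rw [hst1] at h0
  dsimp only at h0
  rw [pvBridge l1 l2 hpre (pvStep2 mf me)] at h0
  obtain ⟨hd, hs, ha, hm, he⟩ := pvL1 (PySem.List.enumerate (l1.zip l2) 0)
  rw [hst1] at hd hs ha hm he
  dsimp only at hd hs ha hm he
  have hxsP : pvXs (PySem.List.enumerate (l1.zip l2) 0)
      = ((l1.zip l2).filter (fun p => p.1 == p.2)).map (fun p => p.1) := by
    rw [pvXs, ← pvEnumFilterMap (l1.zip l2) (fun p => p.1 == p.2) 0, List.map_map]
    rfl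
  have hans : (((PySem.List.enumerate (l1.zip l2) 0).filter (fun p => p.2.1 == p.2.2)).map
      (fun p => p.1)).sum = a := by
    rw [ha]; rfl
  have hclen : ((((PySem.List.enumerate (l1.zip l2) 0).filter (fun p => p.2.1 == p.2.2)).map
      (fun p : Int × Int × Int => p.1)).length : Int)
      = ((pvXs (PySem.List.enumerate (l1.zip l2) 0)).length : Int) := by
    simp [pvXs, pvColls, List.length_map]
  simp only [minimumTotalCost_alt]
  rw [← hxsP, hans, hclen]
  by_cases hcase : 2 * (((pvXs (PySem.List.enumerate (l1.zip l2) 0)).count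
      ((pvXs (PySem.List.enumerate (l1.zip l2) 0)).foldl pvVote (0, 0)).1 : Nat) : Int)
      ≤ ((pvXs (PySem.List.enumerate (l1.zip l2) 0)).length : Int)
  · rw [if_pos hcase]
    -- no strict majority among the colliding values: A's check must fail too
    have hnomaj : ¬ PySem.Int.floordiv s 2 < mf := by
      rw [PySem.Int.floordiv_lt_iff_lt_mul (by omega : (0:Int) < 2), hs]
      intro hlt
      have hmaj : ((pvXs (PySem.List.enumerate (l1.zip l2) 0)).length : Int)
          < 2 * (((pvXs (PySem.List.enumerate (l1.zip l2) 0)).count me : Nat) : Int) := by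
        rw [← hm]; omega
      have hc := pvVoteMajority _ me hmaj
      rw [hc] at hcase
      rw [hm] at hlt
      omega
    rw [pvLoop2Id mf me _ (s, a) hnomaj] at h0
    dsimp only at h0
    rw [h0, if_neg hnomaj]
  · rw [if_neg hcase]
    -- strict majority: A tracked the same element, with the same count
    have hmee : me = ((pvXs (PySem.List.enumerate (l1.zip l2) 0)).foldl pvVote (0, 0)).1 := by
      by_contra hne
      have h2 := pvTwoCount (pvXs (PySem.List.enumerate (l1.zip l2) 0)) me
        ((pvXs (PySem.List.enumerate (l1.zip l2) 0)).foldl pvVote (0, 0)).1 hne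
      have h1 := he ((pvXs (PySem.List.enumerate (l1.zip l2) 0)).foldl pvVote (0, 0)).1
      rw [hm] at h1
      omega
    have hmfc : mf = (((pvXs (PySem.List.enumerate (l1.zip l2) 0)).count
        ((pvXs (PySem.List.enumerate (l1.zip l2) 0)).foldl pvVote (0, 0)).1 : Nat) : Int) := by
      rw [hm, hmee]
    rw [hmfc, hmee] at h0
    rw [pvLoop2Slice _ _ _ s a (by rw [hs]; omega)] at h0
    rw [h0, hs]
    rw [PySem.List.slice_to _ (by omega)]

-- ===== VERDICT (by name: the statement is the Claim_ definition above) =====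
theorem minimumTotalCost_spec : Claim_equal_minimumTotalCost := by
  intro nums1 nums2 _ hpre
  unfold Spec_minimumTotalCost
  exact minimumTotalCost_spec' nums1 nums2 hpre
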